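-- pv_equiv track=rewrite | github.com/w4nderwaffe/AOIS | LAB1/src/number_repr/ieee754.py | _round_fraction_with_guard
-- ===== SOURCE A (Python) =====
-- def _round_fraction_with_guard(main_bits, guard_bit, sticky_bit):
--     rounded = main_bits[:]
--     lsb = rounded[-1] if rounded else 0
--     if guard_bit == 1 and (sticky_bit == 1 or lsb == 1):
--         carry = 1
--         for i in range(len(rounded) - 1, -1, -1):
--             total = rounded[i] + carry
--             rounded[i] = total % 2
--             carry = total // 2
--         return rounded, carry
--     return rounded, 0
-- ===== SOURCE B (Python) =====
-- def _round_fraction_with_guard(main_bits, guard_bit, sticky_bit):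
--     lsb = main_bits[-1] if main_bits else 0
--     if guard_bit == 1 and (sticky_bit == 1 or lsb == 1):
--         n = len(main_bits)
--         value = 0
--         for b in main_bits:
--             value = value * 2 + b
--         value += 1
--         return [(value >> (n - 1 - i)) & 1 for i in range(n)], value >> n
--     return main_bits[:], 0
-- ===== Notes on version B (the rewrite author's own statement) =====
-- stated objective: alternative
-- what changed: Replaces the in-place right-to-left ripple-carry loop over the bit list with arithmetic: fold the bits into one integer, add 1, and rebuild the list (and carry) by shifting/masking that single number.
import Mathlib
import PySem

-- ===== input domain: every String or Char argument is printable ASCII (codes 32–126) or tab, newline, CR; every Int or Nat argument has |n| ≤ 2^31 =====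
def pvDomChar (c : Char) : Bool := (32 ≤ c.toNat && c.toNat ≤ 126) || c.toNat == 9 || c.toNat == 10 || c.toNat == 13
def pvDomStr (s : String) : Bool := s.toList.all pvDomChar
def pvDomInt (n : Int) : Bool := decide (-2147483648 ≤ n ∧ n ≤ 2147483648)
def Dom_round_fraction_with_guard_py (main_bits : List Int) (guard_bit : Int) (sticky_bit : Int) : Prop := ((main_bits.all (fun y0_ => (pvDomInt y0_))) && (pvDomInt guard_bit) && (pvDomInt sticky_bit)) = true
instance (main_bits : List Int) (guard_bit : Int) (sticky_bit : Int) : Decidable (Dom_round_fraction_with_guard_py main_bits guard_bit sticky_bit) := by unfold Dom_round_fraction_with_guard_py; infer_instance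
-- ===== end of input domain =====

-- B replaces A's in-place ripple-carry loop by integer arithmetic: fold the bits into one
-- number, add 1, rebuild list and carry by division/remainder (objective: alternative).

-- ===== PORT A =====
-- the for-loop 'for i in range(len(rounded)-1, -1, -1)' with carry flowing right-to-left,
-- as structural recursion from the right end of the list (same totals, same order)
def pvRippleA : List Int → List Int × Int
  | [] => ([], 1)
  | x :: xs =>
    let r := pvRippleA xs
    ((PySem.Int.mod (x + r.2) 2) :: r.1, PySem.Int.floordiv (x + r.2) 2)

def round_fraction_with_guard_py (main_bits : List Int) (guard_bit : Int) (sticky_bit : Int) : List Int × Int :=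
  let rounded := main_bits
  let lsb := match rounded.getLast? with | some b => b | none => 0   -- rounded[-1] if rounded else 0
  if guard_bit = 1 ∧ (sticky_bit = 1 ∨ lsb = 1) then pvRippleA rounded
  else (rounded, 0)

-- ===== PORT B =====
-- Python's 'v >> k' and 'v & 1' on ints are exactly floor division by 2^k and mod 2
def round_fraction_with_guard_py_alt (main_bits : List Int) (guard_bit : Int) (sticky_bit : Int) : List Int × Int :=
  let lsb := match main_bits.getLast? with | some b => b | none => 0
  if guard_bit = 1 ∧ (sticky_bit = 1 ∨ lsb = 1) then
    let n := main_bits.length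
    let value := main_bits.foldl (fun a b => a * 2 + b) 0 + 1
    ((List.range n).map (fun i => PySem.Int.mod (PySem.Int.floordiv value (2 ^ (n - 1 - i))) 2),
     PySem.Int.floordiv value (2 ^ n))
  else (main_bits, 0)

-- ===== PRECONDITION & SPEC =====
def Spec_round_fraction_with_guard_py (main_bits : List Int) (guard_bit : Int) (sticky_bit : Int) (out : List Int × Int) : Prop := out = round_fraction_with_guard_py_alt main_bits guard_bit sticky_bit
instance (main_bits : List Int) (guard_bit : Int) (sticky_bit : Int) (out : List Int × Int) : Decidable (Spec_round_fraction_with_guard_py main_bits guard_bit sticky_bit out) := by unfold Spec_round_fraction_with_guard_py; infer_instance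

-- ===== CLAIM (what is proved, stated in full; the proofs are below) =====
def Claim_equal_round_fraction_with_guard_py : Prop := ∀ (main_bits : List Int) (guard_bit : Int) (sticky_bit : Int), Dom_round_fraction_with_guard_py main_bits guard_bit sticky_bit → Spec_round_fraction_with_guard_py main_bits guard_bit sticky_bit (round_fraction_with_guard_py main_bits guard_bit sticky_bit)

-- ===== LEMMAS AND PROOFS =====

-- B's fold, with a general accumulator
theorem pvFoldl_acc (xs : List Int) (a : Int) :
    xs.foldl (fun a b => a * 2 + b) a = a * 2 ^ xs.length + xs.foldl (fun a b => a * 2 + b) 0 := by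
  induction xs generalizing a with
  | nil => simp
  | cons x t ih =>
    simp only [List.foldl_cons, List.length_cons]
    rw [ih (a * 2 + x), ih (0 * 2 + x)]
    ring

-- the ripple-carry loop computes the bits and carry of (value + 1)
theorem pvRipple_eq (xs : List Int) :
    pvRippleA xs =
      ((List.range xs.length).map (fun i =>
          (xs.foldl (fun a b => a * 2 + b) 0 + 1) / 2 ^ (xs.length - 1 - i) % 2),
       (xs.foldl (fun a b => a * 2 + b) 0 + 1) / 2 ^ xs.length) := by
  induction xs with
  | nil => simp [pvRippleA]
  | cons x t ih =>
    set n := t.length with hn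
    set v : Int := t.foldl (fun a b => a * 2 + b) 0 + 1 with hv
    have hV : (x :: t).foldl (fun a b => a * 2 + b) 0 + 1 = v + x * 2 ^ n := by
      simp only [List.foldl_cons, hv]
      rw [pvFoldl_acc t (0 * 2 + x)]
      ring
    have hdiv : (v + x * 2 ^ n) / 2 ^ n = v / 2 ^ n + x := by
      rw [Int.add_mul_ediv_right _ _ (by positivity : (2:Int) ^ n ≠ 0)]
    simp only [pvRippleA, ih, List.length_cons, hV]
    refine Prod.ext ?_ ?_
    · -- bit lists agree
      show PySem.Int.mod (x + v / 2 ^ n) 2 ::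
            (List.range n).map (fun i => v / 2 ^ (n - 1 - i) % 2) =
          (List.range (n + 1)).map (fun i => (v + x * 2 ^ n) / 2 ^ (n + 1 - 1 - i) % 2)
      rw [List.range_succ_eq_map, List.map_cons, List.map_map]
      congr 1
      · -- head bit
        rw [PySem.Int.mod_eq_emod_of_pos (by norm_num)]
        simp only [Nat.add_sub_cancel, Nat.sub_zero, hdiv]
        ring_nf
      · -- tail bits
        refine List.map_congr_left ?_
        intro i hi
        have hi' : i < n := List.mem_range.mp hi
        simp only [Function.comp]
        have h1 : n + 1 - 1 - Nat.succ i = n - 1 - i := by omega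
        rw [h1]
        have hk : n - 1 - i < n := by omega
        have h2 : (2:Int) ^ n = 2 ^ (n - (n - 1 - i)) * 2 ^ (n - 1 - i) := by
          rw [← pow_add]; congr 1; omega
        have h3 : (v + x * 2 ^ n) / 2 ^ (n - 1 - i) =
            v / 2 ^ (n - 1 - i) + x * 2 ^ (n - (n - 1 - i)) := by
          rw [h2, ← mul_assoc, Int.add_mul_ediv_right _ _ (by positivity : (2:Int) ^ (n - 1 - i) ≠ 0)]
        rw [h3]
        have h4 : x * 2 ^ (n - (n - 1 - i)) = x * 2 ^ (n - (n - 1 - i) - 1) * 2 := by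
          rw [mul_assoc, ← pow_succ]; congr 2; omega
        rw [h4]; omega
    · -- carries agree
      show PySem.Int.floordiv (x + v / 2 ^ n) 2 = (v + x * 2 ^ n) / 2 ^ (n + 1)
      rw [PySem.Int.floordiv_eq_ediv_of_pos (by norm_num)]
      have : (2:Int) ^ (n + 1) = 2 ^ n * 2 := by rw [pow_succ]
      rw [this, ← Int.ediv_ediv_of_nonneg (by positivity : (0:Int) ≤ 2 ^ n), hdiv]
      ring_nf

-- PySem floor ops with positive powers of two are ediv/emod
theorem pvAlt_eq (main_bits : List Int) (guard_bit : Int) (sticky_bit : Int) :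
    round_fraction_with_guard_py main_bits guard_bit sticky_bit =
      round_fraction_with_guard_py_alt main_bits guard_bit sticky_bit := by
  unfold round_fraction_with_guard_py round_fraction_with_guard_py_alt
  dsimp only
  split_ifs with h
  · rw [pvRipple_eq]
    refine Prod.ext ?_ ?_
    · refine List.map_congr_left ?_
      intro i _
      rw [PySem.Int.mod_eq_emod_of_pos (by norm_num),
          PySem.Int.floordiv_eq_ediv_of_pos (by positivity)]
    · rw [PySem.Int.floordiv_eq_ediv_of_pos (by positivity)]
  · rfl

-- ===== VERDICT (by name: the statement is the Claim_ definition above) =====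
theorem round_fraction_with_guard_py_spec : Claim_equal_round_fraction_with_guard_py := by
  intro main_bits guard_bit sticky_bit _
  unfold Spec_round_fraction_with_guard_py
  exact pvAlt_eq main_bits guard_bit sticky_bit
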